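-- pv_equiv track=rewrite | github.com/Dracnoian/discadian2 | utils/helpers.py | detect_milestone
-- ===== SOURCE A (Python) =====
-- from typing import Optional, List, Dict, Any
--
-- def detect_milestone(
--     old_value: int,
--     new_value: int,
--     thresholds: List[int]
-- ) -> Optional[int]:
--     """Detect if a value crossed a milestone threshold.
--
--     Args:
--         old_value: Previous value
--         new_value: Current value
--         thresholds: List of milestone thresholds
--
--     Returns:
--         The milestone threshold crossed, or None
--     """
--     for threshold in sorted(thresholds):
--         if old_value < threshold <= new_value:
--             return threshold
--     return None
-- ===== SOURCE B (Python) =====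
-- def detect_milestone(old_value, new_value, thresholds):
--     best = None
--     for t in thresholds:
--         if old_value < t <= new_value:
--             if best is None or t < best:
--                 best = t
--     return best
-- ===== Notes on version B (the rewrite author's own statement) =====
-- stated objective: faster
-- what changed: Replaces sort-then-scan-for-first-match with a single linear pass that tracks the minimum threshold t with old_value < t <= new_value.
import Mathlib
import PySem

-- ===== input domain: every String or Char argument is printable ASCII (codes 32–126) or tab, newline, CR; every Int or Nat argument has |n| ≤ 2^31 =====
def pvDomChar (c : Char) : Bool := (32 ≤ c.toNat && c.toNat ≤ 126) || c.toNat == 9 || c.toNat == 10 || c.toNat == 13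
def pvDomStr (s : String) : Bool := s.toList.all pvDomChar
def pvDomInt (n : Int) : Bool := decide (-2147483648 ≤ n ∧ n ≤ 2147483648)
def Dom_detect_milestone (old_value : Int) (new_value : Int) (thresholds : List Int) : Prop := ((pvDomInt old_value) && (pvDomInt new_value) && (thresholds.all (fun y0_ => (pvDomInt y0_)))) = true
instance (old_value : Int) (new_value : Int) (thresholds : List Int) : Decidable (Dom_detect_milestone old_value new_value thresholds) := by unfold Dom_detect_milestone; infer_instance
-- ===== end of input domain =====

-- B replaces A's sort-then-scan with a single linear pass tracking the minimum crossed threshold (faster: O(n) vs O(n log n)).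

-- ===== PORT A =====
-- 'for threshold in sorted(thresholds): if old < threshold <= new: return threshold' / 'return None'
def detectA_loop (old_value : Int) (new_value : Int) : List Int → Option Int
  | [] => none
  | t :: rest =>
    if old_value < t ∧ t ≤ new_value then some t
    else detectA_loop old_value new_value rest

def detect_milestone (old_value : Int) (new_value : Int) (thresholds : List Int) : Option Int :=
  detectA_loop old_value new_value (PySem.List.sorted thresholds (fun x => x) false)

-- ===== PORT B =====
-- one pass: keep the least t with old < t <= new seen so far
def detect_milestone_alt (old_value : Int) (new_value : Int) (thresholds : List Int) : Option Int :=
  thresholds.foldl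
    (fun best t =>
      if old_value < t ∧ t ≤ new_value then
        match best with
        | none => some t
        | some m => if t < m then some t else some m
      else best)
    none

-- ===== PRECONDITION & SPEC =====
def Spec_detect_milestone (old_value : Int) (new_value : Int) (thresholds : List Int) (out : Option Int) : Prop := out = detect_milestone_alt old_value new_value thresholds
instance (old_value : Int) (new_value : Int) (thresholds : List Int) (out : Option Int) : Decidable (Spec_detect_milestone old_value new_value thresholds out) := by unfold Spec_detect_milestone; infer_instance

-- ===== CLAIM (what is proved, stated in full; the proofs are below) =====
def Claim_equal_detect_milestone : Prop := ∀ (old_value : Int) (new_value : Int) (thresholds : List Int), Dom_detect_milestone old_value new_value thresholds → Spec_detect_milestone old_value new_value thresholds (detect_milestone old_value new_value thresholds)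

-- ===== LEMMAS AND PROOFS =====

-- option-min: none is the identity, otherwise min of the two values
def omin : Option Int → Option Int → Option Int
  | none, b => b
  | some a, none => some a
  | some a, some b => some (min a b)

lemma omin_none_left (b : Option Int) : omin none b = b := rfl

lemma omin_assoc (a b c : Option Int) : omin (omin a b) c = omin a (omin b c) := by
  cases a <;> cases b <;> cases c <;> simp [omin, min_assoc]

lemma omin_comm (a b : Option Int) : omin a b = omin b a := by
  cases a <;> cases b <;> simp [omin, min_comm]

-- minimum element of xs satisfying the crossing predicate (none if there is none)
def minCross (old_value new_value : Int) (xs : List Int) : Option Int :=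
  xs.foldr (fun t acc => omin (if old_value < t ∧ t ≤ new_value then some t else none) acc) none

lemma minCross_nil (o n : Int) : minCross o n [] = none := rfl

lemma minCross_cons (o n x : Int) (rest : List Int) :
    minCross o n (x :: rest)
      = omin (if o < x ∧ x ≤ n then some x else none) (minCross o n rest) := rfl

lemma minCross_mem {o n : Int} {xs : List Int} {m : Int}
    (h : minCross o n xs = some m) : m ∈ xs := by
  induction xs with
  | nil => simp [minCross_nil] at h
  | cons x rest ih =>
    rw [minCross_cons] at h
    by_cases hx : o < x ∧ x ≤ n
    · rw [if_pos hx] at h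
      cases hrest : minCross o n rest with
      | none => rw [hrest] at h; simp [omin] at h; simp [h]
      | some r =>
        rw [hrest] at h
        simp only [omin, Option.some.injEq] at h
        rcases min_cases x r with ⟨he, _⟩ | ⟨he, _⟩
        · have hmx : m = x := by omega
          subst hmx; exact List.mem_cons_self
        · right; exact ih (by rw [hrest]; rw [he] at h; rw [h])
    · rw [if_neg hx, omin_none_left] at h
      exact List.mem_cons_of_mem x (ih h)

-- B's left fold with accumulator acc equals omin acc (minCross …)
lemma foldB_eq (o n : Int) (xs : List Int) (acc : Option Int) :
    xs.foldl
      (fun best t =>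
        if o < t ∧ t ≤ n then
          match best with
          | none => some t
          | some m => if t < m then some t else some m
        else best) acc
    = omin acc (minCross o n xs) := by
  induction xs generalizing acc with
  | nil => cases acc <;> simp [minCross_nil, omin]
  | cons x rest ih =>
    simp only [List.foldl_cons, ih]
    by_cases hx : o < x ∧ x ≤ n
    · have hstep : (if o < x ∧ x ≤ n then
          match acc with
          | none => some x
          | some m => if x < m then some x else some m
        else acc) = omin acc (some x) := by
        cases acc with
        | none => simp [hx, omin]
        | some m =>
          rw [if_pos hx]
          show (if x < m then some x else some m) = some (min m x)
          split_ifs with h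
          · rw [min_eq_right (le_of_lt h)]
          · rw [min_eq_left (not_lt.mp h)]
      rw [hstep, minCross_cons, if_pos hx, ← omin_assoc]
    · rw [minCross_cons, if_neg hx, if_neg hx, omin_none_left]

-- A's scan of a pairwise-≤ list returns minCross of that list
lemma loopA_eq_minCross (o n : Int) (xs : List Int)
    (hs : xs.Pairwise (· ≤ ·)) :
    detectA_loop o n xs = minCross o n xs := by
  induction xs with
  | nil => simp [detectA_loop, minCross_nil]
  | cons x rest ih =>
    have hle : ∀ y ∈ rest, x ≤ y := (List.pairwise_cons.mp hs).1
    have hrest := ih (List.pairwise_cons.mp hs).2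
    by_cases hx : o < x ∧ x ≤ n
    · simp only [detectA_loop, hx, if_true, and_self]
      rw [minCross_cons, if_pos hx]
      cases hr : minCross o n rest with
      | none => simp [omin]
      | some r =>
        have := hle r (minCross_mem hr)
        simp [omin, min_eq_left this]
    · simp only [detectA_loop, hx, if_neg, not_false_iff]
      rw [hrest, minCross_cons, if_neg hx, omin_none_left]

-- minCross is invariant under permutation
lemma minCross_perm (o n : Int) {xs ys : List Int} (h : xs.Perm ys) :
    minCross o n xs = minCross o n ys := by
  induction h with
  | nil => rfl
  | cons x _ ih => rw [minCross_cons, minCross_cons, ih]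
  | swap x y l =>
    rw [minCross_cons, minCross_cons, minCross_cons, minCross_cons,
      ← omin_assoc, ← omin_assoc, omin_comm (if o < y ∧ y ≤ n then some y else none)]
  | trans _ _ ih1 ih2 => rw [ih1, ih2]

-- ===== VERDICT (by name: the statement is the Claim_ definition above) =====
theorem detect_milestone_spec : Claim_equal_detect_milestone := by
  intro o n ths _
  unfold Spec_detect_milestone detect_milestone detect_milestone_alt
  rw [foldB_eq, loopA_eq_minCross o n _ (by
    have := PySem.List.sorted_pairwise ths (fun x => x)
    simpa using this)]
  rw [minCross_perm o n (PySem.List.sorted_perm ths (fun x => x) false), omin_none_left]
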